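-- pv_equiv track=rewrite | github.com/Trace231/SGD_formal | orchestrator/sample_test_watch.py | parse_agent9_status
-- ===== SOURCE A (Python) =====
-- from typing import Any
--
-- def parse_agent9_status(captured: str) -> dict[str, Any]:
--     status = {"state": "unknown", "raw": ""}
--     for line in reversed(captured.splitlines()):
--         if "[Agent9] Plan ready" in line:
--             status = {"state": "plan_ready", "raw": line.strip()}
--             break
--         if "[Agent9] All parse attempts failed" in line:
--             status = {"state": "parse_failed", "raw": line.strip()}
--             break
--         if "Strategy plan unavailable" in line:
--             status = {"state": "empty_plan", "raw": line.strip()}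
--             break
--         if "Parse attempt" in line and "[Agent9]" in line:
--             status = {"state": "retrying", "raw": line.strip()}
--             break
--     return status
-- ===== SOURCE B (Python) =====
-- _RULES = [
--     ("plan_ready", ["[Agent9] Plan ready"]),
--     ("parse_failed", ["[Agent9] All parse attempts failed"]),
--     ("empty_plan", ["Strategy plan unavailable"]),
--     ("retrying", ["Parse attempt", "[Agent9]"]),
-- ]
--
--
-- def _classify(line):
--     """First rule (in priority order) whose needles all occur in the line."""
--     for state, needles in _RULES:
--         if all(n in line for n in needles):
--             return state
--     return None
--
--
-- def parse_agent9_status(captured: str) -> dict: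
--     # Stage 1: classify every line against the rule table, keeping the hits.
--     hits = [(state, line.strip())
--             for line in captured.splitlines()
--             for state in [_classify(line)]
--             if state is not None]
--     # Stage 2: the last hit in original order wins.
--     if hits:
--         state, raw = hits[-1]
--         return {"state": state, "raw": raw}
--     return {"state": "unknown", "raw": ""}
-- ===== Notes on version B (the rewrite author's own statement) =====
-- stated objective: alternative
-- what changed: Replaced the reversed scan with inline if/break branches by a data-driven design: a marker-rule table plus a generic classifier, a filter-map pass collecting all classified lines, and selection of the last hit.
import Mathlib
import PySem

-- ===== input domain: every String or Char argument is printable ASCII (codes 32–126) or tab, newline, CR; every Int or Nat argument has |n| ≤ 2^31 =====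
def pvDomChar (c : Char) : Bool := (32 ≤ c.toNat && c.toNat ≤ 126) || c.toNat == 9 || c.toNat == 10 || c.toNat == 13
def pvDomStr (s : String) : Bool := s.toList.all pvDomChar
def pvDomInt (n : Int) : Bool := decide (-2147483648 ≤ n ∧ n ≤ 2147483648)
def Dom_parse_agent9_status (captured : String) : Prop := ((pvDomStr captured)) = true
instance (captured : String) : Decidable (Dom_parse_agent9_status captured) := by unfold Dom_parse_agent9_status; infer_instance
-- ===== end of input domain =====

-- B replaces A's reversed if/break scan by a rule table + classifier, a filter-map collecting all hits, and picking the last hit (alternative decomposition; same result).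

-- ===== PORT A =====
-- A's reversed loop with break: first match in the reversed line list wins.
def pvGoA : List String → List (String × String)
  | [] => [("state", "unknown"), ("raw", "")]
  | line :: rest =>
    if PySem.Str.isIn "[Agent9] Plan ready" line then
      [("state", "plan_ready"), ("raw", PySem.Str.strip line)]
    else if PySem.Str.isIn "[Agent9] All parse attempts failed" line then
      [("state", "parse_failed"), ("raw", PySem.Str.strip line)]
    else if PySem.Str.isIn "Strategy plan unavailable" line then
      [("state", "empty_plan"), ("raw", PySem.Str.strip line)]
    else if PySem.Str.isIn "Parse attempt" line && PySem.Str.isIn "[Agent9]" line then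
      [("state", "retrying"), ("raw", PySem.Str.strip line)]
    else pvGoA rest

def parse_agent9_status (captured : String) : List (String × String) :=
  pvGoA (PySem.Str.splitlines captured).reverse

-- ===== PORT B =====
-- The rule table: (state, needles) pairs in priority order.
def pvRules : List (String × List String) :=
  [("plan_ready", ["[Agent9] Plan ready"]),
   ("parse_failed", ["[Agent9] All parse attempts failed"]),
   ("empty_plan", ["Strategy plan unavailable"]),
   ("retrying", ["Parse attempt", "[Agent9]"])]

-- First rule whose needles all occur in the line.
def pvClassify (line : String) : Option String :=
  (pvRules.find? (fun r => r.2.all (fun n => PySem.Str.isIn n line))).map (·.1)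

def parse_agent9_status_alt (captured : String) : List (String × String) :=
  let hits := (PySem.Str.splitlines captured).filterMap
    (fun line => (pvClassify line).map (fun s => (s, PySem.Str.strip line)))
  match hits.getLast? with
  | some (s, r) => [("state", s), ("raw", r)]
  | none => [("state", "unknown"), ("raw", "")]

-- ===== PRECONDITION & SPEC =====
def Spec_parse_agent9_status (captured : String) (out : List (String × String)) : Prop := out = parse_agent9_status_alt captured
instance (captured : String) (out : List (String × String)) : Decidable (Spec_parse_agent9_status captured out) := by unfold Spec_parse_agent9_status; infer_instance

-- ===== CLAIM (what is proved, stated in full; the proofs are below) =====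
def Claim_equal_parse_agent9_status : Prop := ∀ (captured : String), Dom_parse_agent9_status captured → Spec_parse_agent9_status captured (parse_agent9_status captured)

-- ===== LEMMAS AND PROOFS =====
-- B's whole-list computation, as a function of the line list.
def pvAltOn (ls : List String) : List (String × String) :=
  match (ls.filterMap (fun line => (pvClassify line).map (fun s => (s, PySem.Str.strip line)))).getLast? with
  | some (s, r) => [("state", s), ("raw", r)]
  | none => [("state", "unknown"), ("raw", "")]

-- Per-line: A's if-chain step is exactly classification against the rule table.
theorem pvGoA_cons (x : String) (rest : List String) :
    pvGoA (x :: rest) =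
      match pvClassify x with
      | some s => [("state", s), ("raw", PySem.Str.strip x)]
      | none => pvGoA rest := by
  simp only [pvGoA, pvClassify, pvRules, List.find?, List.all, Bool.and_true, Option.map]
  repeat' (split <;> simp_all)
  cases hp : PySem.Chars.isIn ['P','a','r','s','e',' ','a','t','t','e','m','p','t'] x.toList <;>
    simp_all

theorem pvAltOn_append_one (ls : List String) (x : String) :
    pvAltOn (ls ++ [x]) =
      match pvClassify x with
      | some s => [("state", s), ("raw", PySem.Str.strip x)]
      | none => pvAltOn ls := by
  unfold pvAltOn
  rcases h : pvClassify x with _ | s <;>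
    simp [List.filterMap_append, h, List.getLast?_append]

-- Reversed search with break equals collect-hits-then-last, for any line list.
theorem pvGoA_reverse_eq_altOn (ls : List String) :
    pvGoA ls.reverse = pvAltOn ls := by
  induction ls using List.reverseRecOn with
  | nil => rfl
  | append_singleton ls x ih =>
    rw [List.reverse_append, List.reverse_singleton, List.singleton_append,
      pvGoA_cons, pvAltOn_append_one, ih]

-- ===== VERDICT (by name: the statement is the Claim_ definition above) =====
theorem parse_agent9_status_spec : Claim_equal_parse_agent9_status := by
  intro captured _
  unfold Spec_parse_agent9_status parse_agent9_status parse_agent9_status_alt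
  exact pvGoA_reverse_eq_altOn _
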